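-- pv_equiv track=rewrite | github.com/Pedram-Fdi/CRP-PLT-SDDP | Tool.py | Transform4d
-- ===== SOURCE A (Python) =====
-- def Transform4d(array, dimension1, dimension2, dimension3, dimension4):
--     if len(array) != dimension1 * dimension2 * dimension3 * dimension4:
--         raise ValueError("Array size does not match the specified dimensions.")
--
--     result = [[[
--         [array[i * (dimension2 * dimension3 * dimension4) + j * (dimension3 * dimension4) + k * dimension4 + l]
--             for l in range(dimension4)]
--                 for k in range(dimension3)]
--                     for j in range(dimension2)]
--                         for i in range(dimension1)]
--
--     return result
-- ===== SOURCE B (Python) =====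
-- def _chunks(flat, d, sub):
--     return [flat[i * sub:(i + 1) * sub] for i in range(d)]
--
--
-- def Transform4d(array, dimension1, dimension2, dimension3, dimension4):
--     if len(array) != dimension1 * dimension2 * dimension3 * dimension4:
--         raise ValueError("Array size does not match the specified dimensions.")
--     return [[_chunks(block2, dimension3, dimension4)
--              for block2 in _chunks(block1, dimension2, dimension3 * dimension4)]
--             for block1 in _chunks(array, dimension1, dimension2 * dimension3 * dimension4)]
-- ===== Notes on version B (the rewrite author's own statement) =====
-- stated objective: alternative
-- what changed: B reshapes by recursively slicing the flat list into contiguous blocks level by level (three nested chunking passes) instead of computing an absolute flat index for every element with per-element multiplications.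
import Mathlib
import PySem

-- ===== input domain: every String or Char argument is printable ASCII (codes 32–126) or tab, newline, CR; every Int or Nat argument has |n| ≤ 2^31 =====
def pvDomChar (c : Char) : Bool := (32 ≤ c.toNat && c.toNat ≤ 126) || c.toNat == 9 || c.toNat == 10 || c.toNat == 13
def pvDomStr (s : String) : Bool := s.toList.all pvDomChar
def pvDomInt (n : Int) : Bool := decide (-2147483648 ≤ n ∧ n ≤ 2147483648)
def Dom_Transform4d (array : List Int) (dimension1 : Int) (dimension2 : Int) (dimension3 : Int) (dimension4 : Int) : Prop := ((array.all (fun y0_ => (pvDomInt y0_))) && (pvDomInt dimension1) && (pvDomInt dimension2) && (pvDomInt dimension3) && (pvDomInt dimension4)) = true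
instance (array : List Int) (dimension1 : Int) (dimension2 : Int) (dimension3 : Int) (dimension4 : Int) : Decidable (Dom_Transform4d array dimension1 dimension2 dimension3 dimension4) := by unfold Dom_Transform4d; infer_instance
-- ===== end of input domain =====

-- B reshapes by slicing the flat list into contiguous blocks level by level (three nested
-- chunking passes) instead of computing an absolute flat index for every element (objective: alternative).

-- ===== PORT A =====
-- the `else []` branch corresponds to Python's `raise ValueError`, excluded by Pre_
def Transform4d (array : List Int) (dimension1 : Int) (dimension2 : Int) (dimension3 : Int) (dimension4 : Int) : List (List (List (List Int))) :=
  if (array.length : Int) ≠ dimension1 * dimension2 * dimension3 * dimension4 then []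
  else
    (PySem.List.pyRange 0 dimension1 1).map (fun i =>
      (PySem.List.pyRange 0 dimension2 1).map (fun j =>
        (PySem.List.pyRange 0 dimension3 1).map (fun k =>
          (PySem.List.pyRange 0 dimension4 1).map (fun l =>
            PySem.List.pyGetD array
              (i * (dimension2 * dimension3 * dimension4) + j * (dimension3 * dimension4) + k * dimension4 + l) 0))))

-- ===== PORT B =====
def pvChunks (flat : List Int) (d : Int) (sub : Int) : List (List Int) :=
  (PySem.List.pyRange 0 d 1).map (fun i => PySem.List.slice flat (some (i * sub)) (some ((i + 1) * sub)))

-- the `else []` branch corresponds to Python's `raise ValueError`, excluded by Pre_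
def Transform4d_alt (array : List Int) (dimension1 : Int) (dimension2 : Int) (dimension3 : Int) (dimension4 : Int) : List (List (List (List Int))) :=
  if (array.length : Int) ≠ dimension1 * dimension2 * dimension3 * dimension4 then []
  else
    (pvChunks array dimension1 (dimension2 * dimension3 * dimension4)).map (fun block1 =>
      (pvChunks block1 dimension2 (dimension3 * dimension4)).map (fun block2 =>
        pvChunks block2 dimension3 dimension4))

-- ===== PRECONDITION & SPEC =====
-- Pre_ excludes exactly the inputs where A raises ValueError (length ≠ product of dimensions)
def Pre_Transform4d (array : List Int) (dimension1 : Int) (dimension2 : Int) (dimension3 : Int) (dimension4 : Int) : Prop :=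
  (array.length : Int) = dimension1 * dimension2 * dimension3 * dimension4
instance (array : List Int) (dimension1 : Int) (dimension2 : Int) (dimension3 : Int) (dimension4 : Int) : Decidable (Pre_Transform4d array dimension1 dimension2 dimension3 dimension4) := by unfold Pre_Transform4d; infer_instance

def pvWitness_Transform4d : List Int × Int × Int × Int × Int := ([1, 2, 3, 4], 2, 2, 1, 1)

def Spec_Transform4d (array : List Int) (dimension1 : Int) (dimension2 : Int) (dimension3 : Int) (dimension4 : Int) (out : List (List (List (List Int)))) : Prop := out = Transform4d_alt array dimension1 dimension2 dimension3 dimension4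
instance (array : List Int) (dimension1 : Int) (dimension2 : Int) (dimension3 : Int) (dimension4 : Int) (out : List (List (List (List Int)))) : Decidable (Spec_Transform4d array dimension1 dimension2 dimension3 dimension4 out) := by unfold Spec_Transform4d; infer_instance

-- ===== CLAIM (what is proved, stated in full; the proofs are below) =====
def Claim_equal_Transform4d : Prop := ∀ (array : List Int) (dimension1 : Int) (dimension2 : Int) (dimension3 : Int) (dimension4 : Int), Dom_Transform4d array dimension1 dimension2 dimension3 dimension4 → Pre_Transform4d array dimension1 dimension2 dimension3 dimension4 → Spec_Transform4d array dimension1 dimension2 dimension3 dimension4 (Transform4d array dimension1 dimension2 dimension3 dimension4)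

-- ===== LEMMAS AND PROOFS =====

theorem le_or_lt' (d : Int) : d ≤ 0 ∨ 0 < d := by omega

-- one chunk of B: a slice with natural-number bounds is a drop/take block
theorem pv_chunk_eq (xs : List Int) (i sub : ℕ) :
    PySem.List.slice xs (some ((i : ℤ) * (sub : ℕ))) (some (((i : ℤ) + 1) * (sub : ℕ)))
      = (xs.drop (i * sub)).take sub := by
  have h1 : (i : ℤ) * (sub : ℕ) = ((i * sub : ℕ) : ℤ) := by push_cast; ring
  have h2 : ((i : ℤ) + 1) * (sub : ℕ) = ((i * sub + sub : ℕ) : ℤ) := by push_cast; ring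
  rw [h1, h2, PySem.List.slice_natCast]
  congr 1
  omega

-- slicing a block composes into a single drop/take
theorem pv_take_drop_comp (xs : List Int) (a n b m : ℕ) (h : b + m ≤ n) :
    (((xs.drop a).take n).drop b).take m = (xs.drop (a + b)).take m := by
  rw [List.drop_take, List.drop_drop, List.take_take]
  congr 1
  omega

-- an index-computed block equals a drop/take block of the flat list
theorem pv_block_take (xs : List Int) (a n : ℕ) (h : a + n ≤ xs.length) :
    (List.range n).map (fun t => xs.getD (a + t) 0) = (xs.drop a).take n := by
  apply List.ext_getElem
  · simp; omega
  · intro t h1 h2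
    simp only [List.getElem_map, List.getElem_range, List.getElem_take, List.getElem_drop]
    rw [List.getD_eq_getElem?_getD, List.getElem?_eq_getElem (by simp at h1; omega)]
    simp

theorem Transform4d_spec : Claim_equal_Transform4d := by
  intro array d1 d2 d3 d4 _ hpre
  unfold Spec_Transform4d Transform4d Transform4d_alt
  unfold Pre_Transform4d at hpre
  rw [if_neg (by omega), if_neg (by omega)]
  have hlen0 : (0 : ℤ) ≤ (array.length : ℤ) := Int.natCast_nonneg _
  unfold pvChunks
  rw [List.map_map]
  rcases le_or_lt' d1 with h1 | h1
  · rw [PySem.List.pyRange_one_eq_nil h1]; rfl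
  · apply List.map_congr_left
    intro i hi
    rw [PySem.List.mem_pyRange_one] at hi
    have hs1 : 0 ≤ d2 * d3 * d4 := by nlinarith [hpre, hlen0]
    simp only [Function.comp]
    rw [List.map_map]
    rcases le_or_lt' d2 with h2 | h2
    · rw [PySem.List.pyRange_one_eq_nil h2]; rfl
    · apply List.map_congr_left
      intro j hj
      rw [PySem.List.mem_pyRange_one] at hj
      have hs2 : 0 ≤ d3 * d4 := by nlinarith
      simp only [Function.comp]
      rcases le_or_lt' d3 with h3 | h3
      · rw [PySem.List.pyRange_one_eq_nil h3]; rfl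
      · apply List.map_congr_left
        intro k hk
        rw [PySem.List.mem_pyRange_one] at hk
        have h4 : 0 ≤ d4 := by nlinarith
        -- move to natural numbers
        lift d4 to ℕ using h4 with n4
        lift d3 to ℕ using le_of_lt h3 with n3
        lift d2 to ℕ using le_of_lt h2 with n2
        lift d1 to ℕ using le_of_lt h1 with n1
        lift i to ℕ using hi.1 with ni
        lift j to ℕ using hj.1 with nj
        lift k to ℕ using hk.1 with nk
        have hlen : array.length = n1 * (n2 * (n3 * n4)) := by
          have hz : (array.length : ℤ) = ((n1 * (n2 * (n3 * n4)) : ℕ) : ℤ) := by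
            rw [hpre]; push_cast; ring
          exact_mod_cast hz
        have hi' : ni < n1 := by exact_mod_cast hi.2
        have hj' : nj < n2 := by exact_mod_cast hj.2
        have hk' : nk < n3 := by exact_mod_cast hk.2
        -- rewrite B's three slices into one drop/take block
        have e1 : (n2 : ℤ) * n3 * n4 = ((n2 * (n3 * n4) : ℕ) : ℤ) := by push_cast; ring
        have e2 : (n3 : ℤ) * n4 = ((n3 * n4 : ℕ) : ℤ) := by push_cast; ring
        rw [e1, e2, pv_chunk_eq, pv_chunk_eq, pv_chunk_eq,
            pv_take_drop_comp array _ _ _ _ (by nlinarith [Nat.succ_le_of_lt hj']),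
            pv_take_drop_comp array _ _ _ _ (by nlinarith [Nat.succ_le_of_lt hk'])]
        -- rewrite A's comprehension into the same block
        rw [PySem.List.pyRange_one, List.map_map]
        have hcast : ((n4 : ℤ) - 0).toNat = n4 := by omega
        rw [hcast]
        rw [← pv_block_take array (ni * (n2 * (n3 * n4)) + nj * (n3 * n4) + nk * n4) n4
              (by rw [hlen]; nlinarith [Nat.succ_le_of_lt hi', Nat.succ_le_of_lt hj', Nat.succ_le_of_lt hk'])]
        apply List.map_congr_left
        intro t _
        simp only [Function.comp]
        have ecast : (ni : ℤ) * ((n2 * (n3 * n4) : ℕ) : ℤ) + (nj : ℤ) * ((n3 * n4 : ℕ) : ℤ) + (nk : ℤ) * ((n4 : ℕ) : ℤ) + (0 + (t : ℤ))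
            = ((ni * (n2 * (n3 * n4)) + nj * (n3 * n4) + nk * n4 + t : ℕ) : ℤ) := by push_cast; ring
        rw [ecast, PySem.List.pyGetD_natCast]
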